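-- pv_equiv track=rewrite | github.com/delavet/SOworkspace | src/just_try.py | pre_tokenize
-- ===== SOURCE A (Python) =====
-- def pre_tokenize(text: str):
--     text = ' '.join([token.lower() if token.isupper()
--                      else token for token in text.split(' ')])
--     ret = ''
--     for i in range(len(text)):
--         ch = text[i]
--         latterCh = text[i+1] if i < len(text) - 1 else ''
--         if ch.isupper() and latterCh.isalpha() and not latterCh.isupper():
--             ret += ' ' + ch.lower()
--         elif ch == '_':
--             ret += ' '
--         else:
--             ret += ch
--     return ret
-- ===== SOURCE B (Python) =====
-- def pre_tokenize(text: str):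
--     text = ' '.join([token.lower() if token.isupper()
--                      else token for token in text.split(' ')])
--     # single reversed pass: carry the following character as state instead of
--     # index lookahead, build the output back-to-front in a list
--     out = []
--     follower = ''
--     for ch in reversed(text):
--         if ch == '_':
--             out.append(' ')
--         elif ch.isupper() and follower.isalpha() and not follower.isupper():
--             out.append(ch.lower())
--             out.append(' ')
--         else:
--             out.append(ch)
--         follower = ch
--     return ''.join(reversed(out))
-- ===== Notes on version B (the rewrite author's own statement) =====
-- stated objective: alternative
-- what changed: Replaces the index-based lookahead loop (text[i], text[i+1], string concatenation) by a single reversed pass that carries the following character as state, appends to a list, and joins the reversed list at the end.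
import Mathlib
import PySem

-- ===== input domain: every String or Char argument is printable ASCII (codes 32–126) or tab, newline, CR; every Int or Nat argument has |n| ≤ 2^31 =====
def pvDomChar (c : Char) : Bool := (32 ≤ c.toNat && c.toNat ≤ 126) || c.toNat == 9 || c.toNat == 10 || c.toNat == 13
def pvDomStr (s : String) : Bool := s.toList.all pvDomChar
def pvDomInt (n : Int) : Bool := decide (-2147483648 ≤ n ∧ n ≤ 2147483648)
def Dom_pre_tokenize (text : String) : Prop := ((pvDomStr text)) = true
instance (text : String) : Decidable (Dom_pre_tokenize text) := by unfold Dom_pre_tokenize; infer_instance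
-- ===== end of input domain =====

-- B replaces A's indexed lookahead scan (string concatenation per index) by a single
-- reversed pass that carries the following character as state and builds the output
-- back-to-front in a list (joined once) instead of repeated string concatenation.

-- shared helper: the first line of both Pythons —
-- ' '.join([token.lower() if token.isupper() else token for token in text.split(' ')])
-- token.isupper() (ASCII): at least one letter and no lowercase letter
def pvIsUpperTok (cs : List Char) : Bool :=
  cs.any PySem.Chars.isalpha && cs.all (fun c => !PySem.Chars.islower c)

def pvNormalize (cs : List Char) : List Char :=
  PySem.Chars.join [' ']
    ((PySem.Chars.splitOn cs [' ']).map
      (fun tok => if pvIsUpperTok tok then PySem.Chars.lower tok else tok))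

-- ===== PORT A =====
def pre_tokenize (text : String) : String :=
  let t : List Char := pvNormalize text.toList
  let n : Int := (t.length : Int)
  String.ofList ((PySem.List.pyRange 0 n 1).foldl (fun ret i =>
      let ch := PySem.List.pyGetD t i ' '
      -- Python's latterCh is '' past the end; ported as Option Char (none = '')
      let latter : Option Char :=
        if i < n - 1 then some (PySem.List.pyGetD t (i + 1) ' ') else none
      if PySem.Chars.isupper ch &&
          (latter.any fun d => PySem.Chars.isalpha d && !PySem.Chars.isupper d) then
        ret ++ [' ', PySem.Chars.lowerChar ch]
      else if ch = '_' then ret ++ [' ']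
      else ret ++ [ch]) ([] : List Char))

-- ===== PORT B =====
-- Python's follower starts as '' and is always a char afterwards; ported as Option Char
def pvStepB (st : List Char × Option Char) (ch : Char) : List Char × Option Char :=
  if ch = '_' then (st.1 ++ [' '], some ch)
  else if PySem.Chars.isupper ch &&
      (st.2.any fun d => PySem.Chars.isalpha d && !PySem.Chars.isupper d) then
    (st.1 ++ [PySem.Chars.lowerChar ch, ' '], some ch)
  else (st.1 ++ [ch], some ch)

def pre_tokenize_alt (text : String) : String :=
  let t : List Char := pvNormalize text.toList
  String.ofList ((t.reverse.foldl pvStepB (([] : List Char), (none : Option Char))).1.reverse)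

-- ===== PRECONDITION & SPEC =====
def Spec_pre_tokenize (text : String) (out : String) : Prop := out = pre_tokenize_alt text
instance (text : String) (out : String) : Decidable (Spec_pre_tokenize text out) := by unfold Spec_pre_tokenize; infer_instance

-- ===== CLAIM (what is proved, stated in full; the proofs are below) =====
def Claim_equal_pre_tokenize : Prop := ∀ (text : String), Dom_pre_tokenize text → Spec_pre_tokenize text (pre_tokenize text)

-- ===== LEMMAS AND PROOFS =====

-- the per-position emission both programs perform
def pvEmit (ch : Char) (latter : Option Char) : List Char :=
  if PySem.Chars.isupper ch &&
      (latter.any fun d => PySem.Chars.isalpha d && !PySem.Chars.isupper d) then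
    [' ', PySem.Chars.lowerChar ch]
  else if ch = '_' then [' ']
  else [ch]

-- B's per-char emission (reversed order, '_' branch first)
def pvEmitRev (ch : Char) (latter : Option Char) : List Char :=
  if ch = '_' then [' ']
  else if PySem.Chars.isupper ch &&
      (latter.any fun d => PySem.Chars.isalpha d && !PySem.Chars.isupper d) then
    [PySem.Chars.lowerChar ch, ' ']
  else [ch]

-- forward spine: each char emitted with its successor (f past the end)
def pvSpineF : List Char → Option Char → List Char
  | [], _ => []
  | c :: rest, f => pvEmit c (rest.head?.or f) ++ pvSpineF rest f

-- B's accumulated output over the reversed list, follower threaded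
def pvG : List Char → Option Char → List Char
  | [], _ => []
  | c :: r, f => pvEmitRev c f ++ pvG r (some c)

theorem pvEmitRev_reverse (c : Char) (f : Option Char) :
    (pvEmitRev c f).reverse = pvEmit c f := by
  unfold pvEmitRev pvEmit
  by_cases h : c = '_'
  · subst h; simp [PySem.Chars.isupper]
  · simp [h]; split_ifs <;> simp_all

theorem pvStepB_eq (st : List Char × Option Char) (c : Char) :
    pvStepB st c = (st.1 ++ pvEmitRev c st.2, some c) := by
  unfold pvStepB pvEmitRev
  split_ifs <;> rfl

theorem pvFoldB (l : List Char) :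
    ∀ (acc : List Char) (f : Option Char),
      (l.foldl pvStepB (acc, f)).1 = acc ++ pvG l f := by
  induction l with
  | nil => intro acc f; simp [pvG]
  | cons c r ih =>
      intro acc f
      simp only [List.foldl_cons, pvStepB_eq, pvG, ih, List.append_assoc]

theorem pvLast_cons (x : Char) (xs : List Char) (f : Option Char) :
    ((x :: xs).getLast?).or f = (xs.getLast?).or (some x) := by
  cases xs <;> simp [List.getLast?_cons]

theorem pvG_append (xs : List Char) :
    ∀ (ys : List Char) (f : Option Char),
      pvG (xs ++ ys) f = pvG xs f ++ pvG ys ((xs.getLast?).or f) := by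
  induction xs with
  | nil => intro ys f; simp [pvG]
  | cons x xs ih =>
      intro ys f
      simp only [List.cons_append, pvG, ih, List.append_assoc, ← pvLast_cons x xs f]

theorem pvG_reverse (t : List Char) :
    ∀ f : Option Char, (pvG t.reverse f).reverse = pvSpineF t f := by
  induction t with
  | nil => intro f; simp [pvG, pvSpineF]
  | cons c rest ih =>
      intro f
      have h1 : (c :: rest).reverse = rest.reverse ++ [c] := by simp
      rw [h1, pvG_append]
      have h2 : (rest.reverse.getLast?).or f = (rest.head?).or f := by
        simp [List.getLast?_reverse]
      simp only [pvG, pvEmitRev, h2]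
      rw [List.reverse_append]
      simp only [pvSpineF, ← pvEmitRev_reverse, ih f, pvEmitRev]
      simp

-- A's loop body is an append of pvEmit, so the fold is a flatMap; then equate to pvSpineF
def pvLatter (t : List Char) (i : Int) : Option Char :=
  if i < (t.length : Int) - 1 then some (PySem.List.pyGetD t (i + 1) ' ') else none

theorem pvA_flatMap (t : List Char) :
    ((PySem.List.pyRange 0 (t.length : Int) 1).foldl (fun ret i =>
      if PySem.Chars.isupper (PySem.List.pyGetD t i ' ') &&
          ((if i < (t.length : Int) - 1 then some (PySem.List.pyGetD t (i + 1) ' ') else none).any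
            fun d => PySem.Chars.isalpha d && !PySem.Chars.isupper d) then
        ret ++ [' ', PySem.Chars.lowerChar (PySem.List.pyGetD t i ' ')]
      else if PySem.List.pyGetD t i ' ' = '_' then ret ++ [' ']
      else ret ++ [PySem.List.pyGetD t i ' ']) ([] : List Char))
    = (PySem.List.pyRange 0 (t.length : Int) 1).flatMap (fun i =>
        pvEmit (PySem.List.pyGetD t i ' ') (pvLatter t i)) := by
  have h : (fun (ret : List Char) (i : Int) =>
      if PySem.Chars.isupper (PySem.List.pyGetD t i ' ') &&
          ((if i < (t.length : Int) - 1 then some (PySem.List.pyGetD t (i + 1) ' ') else none).any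
            fun d => PySem.Chars.isalpha d && !PySem.Chars.isupper d) then
        ret ++ [' ', PySem.Chars.lowerChar (PySem.List.pyGetD t i ' ')]
      else if PySem.List.pyGetD t i ' ' = '_' then ret ++ [' ']
      else ret ++ [PySem.List.pyGetD t i ' '])
      = (fun ret i => ret ++ pvEmit (PySem.List.pyGetD t i ' ') (pvLatter t i)) := by
    funext ret i
    simp only [pvEmit, pvLatter]
    split_ifs <;> rfl
  rw [h, PySem.List.foldl_append_eq_flatMap]
  simp

-- per-index emission over range = forward spine
theorem pvRange_spine (t : List Char) :
    (List.range t.length).flatMap (fun (k : Nat) =>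
      pvEmit (PySem.List.pyGetD t ((k : Nat) : Int) ' ') (pvLatter t ((k : Nat) : Int)))
    = pvSpineF t none := by
  induction t with
  | nil => simp [pvSpineF]
  | cons c rest ih =>
      rw [List.length_cons, List.range_succ_eq_map]
      rw [List.flatMap_cons, List.flatMap_map]
      have h0 : pvEmit (PySem.List.pyGetD (c :: rest) (((0 : Nat) : Int)) ' ')
          (pvLatter (c :: rest) (((0 : Nat) : Int)))
          = pvEmit c ((rest.head?).or none) := by
        cases rest with
        | nil => simp [pvLatter]
        | cons d r =>
            have h1 : (((0 : Nat) : Int) + 1) = ((1 : Nat) : Int) := by norm_num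
            simp only [pvLatter, h1, PySem.List.pyGetD_natCast]
            simp
      have hs : ∀ k : Nat,
          pvEmit (PySem.List.pyGetD (c :: rest) ((Nat.succ k : Nat) : Int) ' ')
            (pvLatter (c :: rest) ((Nat.succ k : Nat) : Int))
          = pvEmit (PySem.List.pyGetD rest ((k : Nat) : Int) ' ') (pvLatter rest ((k : Nat) : Int)) := by
        intro k
        have hidx : ((Nat.succ k : Nat) : Int) + 1 = ((Nat.succ k + 1 : Nat) : Int) := by push_cast; ring
        have hif : (((Nat.succ k : Nat) : Int) < ((c :: rest).length : Int) - 1)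
            ↔ (((k : Nat) : Int) < ((rest.length : Nat) : Int) - 1) := by
          simp [List.length_cons]; omega
        unfold pvLatter
        rw [hidx]
        simp only [PySem.List.pyGetD_natCast, List.getD, Nat.succ_eq_add_one]
        by_cases h : ((k : Nat) : Int) < ((rest.length : Nat) : Int) - 1
        · rw [if_pos (hif.mpr h), if_pos h]
          have h2 : ((k : Nat) : Int) + 1 = ((k + 1 : Nat) : Int) := by push_cast; ring
          rw [h2, PySem.List.pyGetD_natCast]
          simp
        · rw [if_neg (fun hh => h (hif.mp hh)), if_neg h]
          simp
      calc _ = pvEmit c ((rest.head?).or none)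
              ++ (List.range rest.length).flatMap (fun (k : Nat) =>
                pvEmit (PySem.List.pyGetD rest ((k : Nat) : Int) ' ')
                  (pvLatter rest ((k : Nat) : Int))) := by
              rw [h0]; congr 1; exact List.flatMap_congr (fun k _ => hs k)
        _ = pvSpineF (c :: rest) none := by rw [ih]; rfl

-- ===== VERDICT (by name: the statement is the Claim_ definition above) =====
theorem pre_tokenize_spec : Claim_equal_pre_tokenize := by
  intro text _
  unfold Spec_pre_tokenize
  simp only [pre_tokenize, pre_tokenize_alt]
  rw [pvA_flatMap, pvFoldB, List.nil_append, pvG_reverse _ none]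
  rw [PySem.List.pyRange_one]
  rw [List.flatMap_map]
  simp only [Int.sub_zero, Int.toNat_natCast, zero_add]
  rw [pvRange_spine]
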